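-- pv_equiv track=rewrite | github.com/slaf-project/slaf | slaf/core/query_optimizer.py | adaptive_batch_ids
-- ===== SOURCE A (Python) =====
-- def adaptive_batch_ids(
--     integer_ids: list[int], max_batch_size: int = 100, gap_threshold: int = 10
-- ) -> list[list[int]]:
--     """
--     Create optimal batches based on ID distribution patterns
--
--     Args:
--         integer_ids: List of integer IDs to batch
--         max_batch_size: Maximum size of each batch
--         gap_threshold: Maximum gap between consecutive IDs before starting a new batch
--
--     Returns:
--         List of batched ID lists
--     """
--     if len(integer_ids) <= max_batch_size:
--         return [integer_ids]
--
--     sorted_ids = sorted(integer_ids)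
--     batches = []
--     current_batch = [sorted_ids[0]]
--
--     for i in range(1, len(sorted_ids)):
--         current_id = sorted_ids[i]
--         prev_id = sorted_ids[i - 1]
--
--         # Check if we should start a new batch
--         gap_too_large = (current_id - prev_id) > gap_threshold
--         batch_too_large = len(current_batch) >= max_batch_size
--
--         if gap_too_large or batch_too_large:
--             batches.append(current_batch)
--             current_batch = [current_id]
--         else:
--             current_batch.append(current_id)
--
--     if current_batch:
--         batches.append(current_batch)
--
--     return batches
-- ===== SOURCE B (Python) =====
-- def _chunks(run, size):
--     # size is always >= 1 here
--     if not run: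
--         return []
--     return [run[:size]] + _chunks(run[size:], size)
--
--
-- def adaptive_batch_ids(
--     integer_ids: list[int], max_batch_size: int = 100, gap_threshold: int = 10
-- ) -> list[list[int]]:
--     if len(integer_ids) <= max_batch_size:
--         return [integer_ids]
--
--     s = sorted(integer_ids)
--
--     # split the sorted IDs into maximal gap-bounded runs, recorded as slices
--     runs = []
--     start = 0
--     for i in range(1, len(s)):
--         if s[i] - s[i - 1] > gap_threshold:
--             runs.append(s[start:i])
--             start = i
--     runs.append(s[start:])
--
--     size = max(max_batch_size, 1)  # chunk length is at least 1
--     return [c for run in runs for c in _chunks(run, size)]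
-- ===== Notes on version B (the rewrite author's own statement) =====
-- stated objective: alternative
-- what changed: A builds batches in one stateful loop that resets on gaps or size; B first splits the sorted IDs into maximal gap-bounded runs recorded as slices, then chunks each run into fixed-size slices in a second pass.
import Mathlib
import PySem

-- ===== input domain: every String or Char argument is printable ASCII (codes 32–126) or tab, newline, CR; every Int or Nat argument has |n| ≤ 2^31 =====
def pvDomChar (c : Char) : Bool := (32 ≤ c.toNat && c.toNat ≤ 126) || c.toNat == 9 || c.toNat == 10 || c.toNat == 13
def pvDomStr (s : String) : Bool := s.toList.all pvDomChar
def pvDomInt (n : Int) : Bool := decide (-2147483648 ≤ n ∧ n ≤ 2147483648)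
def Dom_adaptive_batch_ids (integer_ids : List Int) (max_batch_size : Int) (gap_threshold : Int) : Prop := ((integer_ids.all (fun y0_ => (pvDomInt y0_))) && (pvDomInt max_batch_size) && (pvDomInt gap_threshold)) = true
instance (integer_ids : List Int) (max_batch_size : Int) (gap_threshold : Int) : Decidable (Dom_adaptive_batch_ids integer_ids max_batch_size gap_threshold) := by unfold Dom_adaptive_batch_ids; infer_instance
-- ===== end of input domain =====

-- B replaces A's single stateful loop by gap-splitting into runs and then chunking each run (alternative decomposition, same cost).

-- ===== PORT A =====
def adaptive_batch_ids (integer_ids : List Int) (max_batch_size : Int) (gap_threshold : Int) : List (List Int) :=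
  if (integer_ids.length : Int) ≤ max_batch_size then [integer_ids]
  else
    let sorted_ids := PySem.List.sorted integer_ids (fun x => x) false
    -- sorted_ids[0]: the list is nonempty here for every input admitted by Pre_, so pyGetD's default is never used
    let st := (PySem.List.pyRange 1 (sorted_ids.length : Int) 1).foldl
      (fun (st : List (List Int) × List Int) i =>
        if (decide (gap_threshold < PySem.List.pyGetD sorted_ids i 0 - PySem.List.pyGetD sorted_ids (i - 1) 0)
            || decide (max_batch_size ≤ (st.2.length : Int)))
        then (st.1 ++ [st.2], [PySem.List.pyGetD sorted_ids i 0])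
        else (st.1, st.2 ++ [PySem.List.pyGetD sorted_ids i 0]))
      ([], [PySem.List.pyGetD sorted_ids 0 0])
    if st.2 ≠ [] then st.1 ++ [st.2] else st.1

-- ===== PORT B =====
-- recursive chunk helper of Source B; the proof argument 1 ≤ size is the termination witness (B only calls it with size ≥ 1)
def pyChunks (size : Int) (hs : 1 ≤ size) (run : List Int) : List (List Int) :=
  if h : run = [] then []
  else PySem.List.slice run none (some size) :: pyChunks size hs (PySem.List.slice run (some size) none)
termination_by run.length
decreasing_by
  rw [PySem.List.slice_from run (by omega)]
  have hlen : run.length ≠ 0 := by simpa using h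
  rw [List.length_drop]
  omega

def adaptive_batch_ids_alt (integer_ids : List Int) (max_batch_size : Int) (gap_threshold : Int) : List (List Int) :=
  if (integer_ids.length : Int) ≤ max_batch_size then [integer_ids]
  else
    let s := PySem.List.sorted integer_ids (fun x => x) false
    let st := (PySem.List.pyRange 1 (s.length : Int) 1).foldl
      (fun (st : List (List Int) × Int) i =>
        if PySem.List.pyGetD s i 0 - PySem.List.pyGetD s (i - 1) 0 > gap_threshold
        then (st.1 ++ [PySem.List.slice s (some st.2) (some i)], i)
        else st)
      ([], 0)
    (st.1 ++ [PySem.List.slice s (some st.2) none]).flatMap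
      (fun run => pyChunks (max max_batch_size 1) (le_max_right _ _) run)

-- ===== PRECONDITION & SPEC =====
-- Pre_ excludes exactly the inputs on which A raises IndexError: empty integer_ids with negative max_batch_size.
def Pre_adaptive_batch_ids (integer_ids : List Int) (max_batch_size : Int) (gap_threshold : Int) : Prop :=
  ¬ (integer_ids = [] ∧ max_batch_size < 0)
instance (integer_ids : List Int) (max_batch_size : Int) (gap_threshold : Int) : Decidable (Pre_adaptive_batch_ids integer_ids max_batch_size gap_threshold) := by unfold Pre_adaptive_batch_ids; infer_instance

def pvWitness_adaptive_batch_ids : List Int × Int × Int := ([1, 2, 30, 31, 3], 2, 5)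

def Spec_adaptive_batch_ids (integer_ids : List Int) (max_batch_size : Int) (gap_threshold : Int) (out : List (List Int)) : Prop := out = adaptive_batch_ids_alt integer_ids max_batch_size gap_threshold
instance (integer_ids : List Int) (max_batch_size : Int) (gap_threshold : Int) (out : List (List Int)) : Decidable (Spec_adaptive_batch_ids integer_ids max_batch_size gap_threshold out) := by unfold Spec_adaptive_batch_ids; infer_instance

-- ===== CLAIM (what is proved, stated in full; the proofs are below) =====
def Claim_equal_adaptive_batch_ids : Prop := ∀ (integer_ids : List Int) (max_batch_size : Int) (gap_threshold : Int), Dom_adaptive_batch_ids integer_ids max_batch_size gap_threshold → Pre_adaptive_batch_ids integer_ids max_batch_size gap_threshold → Spec_adaptive_batch_ids integer_ids max_batch_size gap_threshold (adaptive_batch_ids integer_ids max_batch_size gap_threshold)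
-- ===== LEMMAS AND PROOFS =====

-- structural recursion capturing "for i in range(k, len(s))" reading s[i] and s[i-1]
def pairFoldI {σ : Type} (f : σ → Int → Int → Int → σ) : σ → Int → Int → List Int → σ
  | init, _, _, [] => init
  | init, i, prev, x :: r => pairFoldI f (f init i x prev) (i + 1) x r

-- the common specification: chunked traversal (c = current partial chunk, reset at gaps and at size n)
def cpart (g : Int) (n : Nat) : List Int → Int → List Int → List (List Int)
  | c, _, [] => [c]
  | c, prev, x :: r => if g < x - prev ∨ c.length = n then c :: cpart g n [x] x r else cpart g n (c ++ [x]) x r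

-- B's run splitting, written structurally
def runsA (g : Int) : List Int → Int → List Int → List (List Int)
  | cur, _, [] => [cur]
  | cur, prev, x :: r => if g < x - prev then cur :: runsA g [x] x r else runsA g (cur ++ [x]) x r

-- the two finishing steps
def finA (st : List (List Int) × List Int) : List (List Int) :=
  if st.2 ≠ [] then st.1 ++ [st.2] else st.1
def finB (s : List Int) (st : List (List Int) × Int) : List (List Int) :=
  st.1 ++ [PySem.List.slice s (some st.2) none]

theorem foldl_pyRange_pairs {σ : Type} (f2 : σ → Int → σ) (f : σ → Int → Int → Int → σ) (s : List Int)
    (hf : ∀ st i, f2 st i = f st i (PySem.List.pyGetD s i 0) (PySem.List.pyGetD s (i - 1) 0)) :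
    ∀ (n k : Nat) (init : σ), s.length - k = n → 1 ≤ k → k ≤ s.length →
    (PySem.List.pyRange (k : Int) (s.length : Int) 1).foldl f2 init
    = pairFoldI f init (k : Int) (PySem.List.pyGetD s ((k : Int) - 1) 0) (s.drop k) := by
  intro n
  induction n with
  | zero =>
    intro k init hn h1 hk
    have hk' : k = s.length := by omega
    subst hk'
    rw [PySem.List.pyRange_one_eq_nil le_rfl, List.drop_length]
    rfl
  | succ n ih =>
    intro k init hn h1 hk
    have hklt : k < s.length := by omega
    rw [PySem.List.pyRange_one_cons (by exact_mod_cast hklt)]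
    simp only [List.foldl_cons]
    have h2 : ((k : Int) + 1) = ((k + 1 : Nat) : Int) := by push_cast; ring
    rw [h2, ih (k + 1) _ (by omega) (by omega) (by omega)]
    have hdrop : s.drop k = s[k] :: s.drop (k + 1) := List.drop_eq_getElem_cons hklt
    have hget : PySem.List.pyGetD s (k : Int) 0 = s[k] := by
      rw [PySem.List.pyGetD_eq_getElem s 0 (by positivity) (by exact_mod_cast hklt)]
      simp
    have hget2 : PySem.List.pyGetD s (((k + 1 : Nat) : Int) - 1) 0 = s[k] := by
      have h3 : ((k + 1 : Nat) : Int) - 1 = (k : Int) := by push_cast; ring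
      rw [h3, hget]
    rw [hdrop, hget2]
    simp only [pairFoldI, hf, hget, h2]

theorem pyChunks_cons (size : Int) (hs : 1 ≤ size) (run : List Int) (h : run ≠ []) :
    pyChunks size hs run = run.take size.toNat :: pyChunks size hs (run.drop size.toNat) := by
  conv_lhs => rw [pyChunks]
  rw [dif_neg h, PySem.List.slice_to run (by omega), PySem.List.slice_from run (by omega)]

theorem pyChunks_nil (size : Int) (hs : 1 ≤ size) : pyChunks size hs [] = [] := by
  rw [pyChunks]
  simp

-- chunking a list made of full chunks followed by a nonempty partial chunk
theorem pyChunks_concat (size : Int) (hs : 1 ≤ size) :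
    ∀ (us : List (List Int)) (c : List Int), (∀ v ∈ us, v.length = size.toNat) →
      c ≠ [] → c.length ≤ size.toNat →
      pyChunks size hs (us.flatten ++ c) = us ++ [c] := by
  intro us
  induction us with
  | nil =>
    intro c _ hne hle
    rw [List.flatten_nil, List.nil_append, pyChunks_cons size hs c hne,
        List.take_of_length_le hle, List.drop_eq_nil_of_le hle, pyChunks_nil]
    rfl
  | cons u us ih =>
    intro c hfull hne hle
    have hu : u.length = size.toNat := hfull u (by simp)
    have hne2 : u ++ (us.flatten ++ c) ≠ [] := by
      intro hemp; rcases List.append_eq_nil_iff.mp hemp with ⟨_, h2⟩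
      exact hne (List.append_eq_nil_iff.mp h2).2
    rw [List.flatten_cons, List.append_assoc, pyChunks_cons size hs _ hne2,
        List.take_append_of_le_length (by omega), List.take_of_length_le (by omega),
        List.drop_append_of_le_length (by omega), List.drop_eq_nil_of_le (by omega),
        List.nil_append, ih _ (fun v hv => hfull v (by simp [hv])) hne hle]
    rfl

-- per-run chunking of the runs equals the direct chunked traversal cpart
theorem flat_runs (g size : Int) (hs : 1 ≤ size) :
    ∀ (t : List Int) (prev : Int) (us : List (List Int)) (c : List Int),
      (∀ v ∈ us, v.length = size.toNat) → c ≠ [] → c.length ≤ size.toNat →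
      (runsA g (us.flatten ++ c) prev t).flatMap (fun run => pyChunks size hs run)
      = us ++ cpart g size.toNat c prev t := by
  intro t
  induction t with
  | nil =>
    intro prev us c hfull hne hle
    simp only [runsA, cpart, List.flatMap_cons, List.flatMap_nil, List.append_nil]
    exact pyChunks_concat size hs us c hfull hne hle
  | cons x r ih =>
    intro prev us c hfull hne hle
    simp only [runsA, cpart]
    by_cases hgap : g < x - prev
    · simp only [hgap, if_true, true_or, List.flatMap_cons]
      rw [pyChunks_concat size hs us c hfull hne hle]
      have h1 := ih x [] [x] (by simp) (by simp) (by simp; omega)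
      simp only [List.flatten_nil, List.nil_append] at h1
      rw [h1]
      simp
    · by_cases hfullc : c.length = size.toNat
      · simp only [hgap, hfullc, if_true, false_or, if_false]
        have hrw : us.flatten ++ c ++ [x] = (us ++ [c]).flatten ++ [x] := by simp
        rw [hrw, ih x (us ++ [c]) [x]
          (by intro v hv
              rcases List.mem_append.mp hv with hv | hv
              · exact hfull v hv
              · simp at hv; subst hv; exact hfullc)
          (by simp) (by simp; omega)]
        simp
      · simp only [hgap, hfullc, or_self, if_false]
        have hrw : us.flatten ++ c ++ [x] = us.flatten ++ (c ++ [x]) := by simp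
        rw [hrw, ih x us (c ++ [x]) hfull (by simp) (by simp; omega)]

-- A's loop computes cpart
theorem A_loop (m g size : Int) (hsz : size = max m 1) :
    ∀ (t : List Int) (prev i : Int) (b : List (List Int)) (c : List Int),
      c ≠ [] → c.length ≤ size.toNat →
      finA (pairFoldI (fun (st : List (List Int) × List Int) _ x prev =>
          if (decide (g < x - prev) || decide (m ≤ (st.2.length : Int)))
          then (st.1 ++ [st.2], [x]) else (st.1, st.2 ++ [x])) (b, c) i prev t)
      = b ++ cpart g size.toNat c prev t := by
  intro t
  induction t with
  | nil =>
    intro prev i b c hne _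
    simp [pairFoldI, cpart, finA, hne]
  | cons x r ih =>
    intro prev i b c hne hle
    have hcpos : 0 < c.length := List.length_pos_iff.mpr hne
    have hiff : (m ≤ (c.length : Int)) ↔ (c.length = size.toNat) := by omega
    simp only [pairFoldI, cpart]
    by_cases hc : g < x - prev ∨ c.length = size.toNat
    · have hb : (decide (g < x - prev) || decide (m ≤ (c.length : Int))) = true := by
        rcases hc with h | h
        · simp [h]
        · simp [hiff.mpr h]
      rw [hb, if_pos rfl, if_pos hc,
        ih x (i + 1) (b ++ [c]) [x] (by simp) (by simp; omega)]
      simp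
    · rw [not_or] at hc
      have h2 : ¬ m ≤ (c.length : Int) := fun h => hc.2 (hiff.mp h)
      have hb : (decide (g < x - prev) || decide (m ≤ (c.length : Int))) = false := by
        simp [hc.1, h2]
      rw [hb, if_neg (by simp), if_neg (not_or.mpr hc),
        ih x (i + 1) b (c ++ [x]) (by simp) (by simp; omega)]

-- B's run-splitting loop computes runsA, slices tracked as drop/take
theorem B_loop (g : Int) (s : List Int) :
    ∀ (t : List Int) (prev : Int) (i start : Nat) (runs : List (List Int)),
      start < i → t = s.drop i → i ≤ s.length →
      finB s (pairFoldI (fun (st : List (List Int) × Int) i x prev =>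
          if x - prev > g then (st.1 ++ [PySem.List.slice s (some st.2) (some i)], i) else st)
        (runs, (start : Int)) (i : Int) prev t)
      = runs ++ runsA g (PySem.List.slice s (some (start : Int)) (some (i : Int))) prev t := by
  intro t
  induction t with
  | nil =>
    intro prev i start runs hsi hdrop hil
    have hieq : i = s.length := by
      have := List.drop_eq_nil_iff.mp hdrop.symm
      omega
    subst hieq
    simp only [pairFoldI, runsA, finB]
    congr 2
    rw [PySem.List.slice_natCast, PySem.List.slice_from s (by positivity), Int.toNat_natCast,
        List.take_of_length_le (by rw [List.length_drop])]
  | cons x r ih =>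
    intro prev i start runs hsi hdrop hil
    have hilt : i < s.length := by
      by_contra hcon
      rw [List.drop_eq_nil_of_le (by omega)] at hdrop
      simp at hdrop
    have hcons : s.drop i = s[i] :: s.drop (i + 1) := List.drop_eq_getElem_cons hilt
    rw [hcons] at hdrop
    have hx : x = s[i] := (List.cons.injEq _ _ _ _ ▸ hdrop).1
    have hr : r = s.drop (i + 1) := (List.cons.injEq _ _ _ _ ▸ hdrop).2
    have hcast : ((i : Int) + 1) = ((i + 1 : Nat) : Int) := by push_cast; ring
    simp only [pairFoldI, runsA]
    by_cases hgap : g < x - prev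
    · simp only [hgap, if_true]
      rw [hcast, ih x (i + 1) i (runs ++ [PySem.List.slice s (some (start : Int)) (some (i : Int))])
        (by omega) hr (by omega)]
      have hsingle : PySem.List.slice s (some (i : Int)) (some ((i + 1 : Nat) : Int)) = [x] := by
        rw [PySem.List.slice_natCast]
        have h1 : (i + 1) - i = 1 := by omega
        rw [h1, List.take_one, hcons]
        simp [hx]
      rw [hsingle]
      simp
    · simp only [hgap, if_false]
      rw [hcast, ih x (i + 1) start runs (by omega) hr (by omega)]
      have hext : PySem.List.slice s (some (start : Int)) (some ((i + 1 : Nat) : Int))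
          = PySem.List.slice s (some (start : Int)) (some (i : Int)) ++ [x] := by
        rw [PySem.List.slice_natCast, PySem.List.slice_natCast]
        have h1 : (i + 1) - start = (i - start) + 1 := by omega
        rw [h1, List.take_add_one, List.getElem?_drop]
        have h2 : start + (i - start) = i := by omega
        rw [h2, List.getElem?_eq_getElem hilt]
        simp [hx]
      rw [hext]

theorem A_side (ids : List Int) (m g : Int) (hle : ¬ (ids.length : Int) ≤ m)
    (h0 : Int) (t : List Int) (hst : PySem.List.sorted ids (fun x => x) false = h0 :: t) :
    adaptive_batch_ids ids m g = cpart g (max m 1).toNat [h0] h0 t := by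
  have hsz1 : (1 : Int) ≤ max m 1 := le_max_right _ _
  unfold adaptive_batch_ids
  rw [if_neg hle]
  show finA ((PySem.List.pyRange 1 ((PySem.List.sorted ids (fun x => x) false).length : Int) 1).foldl
      _ ([], [PySem.List.pyGetD (PySem.List.sorted ids (fun x => x) false) 0 0])) = _
  have hget0 : PySem.List.pyGetD (PySem.List.sorted ids (fun x => x) false) 0 0 = h0 := by
    rw [hst, show (0 : Int) = ((0 : Nat) : Int) from rfl, PySem.List.pyGetD_natCast]
    rfl
  have hbr := foldl_pyRange_pairs
    (s := PySem.List.sorted ids (fun x => x) false)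
    (f2 := fun (st : List (List Int) × List Int) i =>
        if (decide (g < PySem.List.pyGetD (PySem.List.sorted ids (fun x => x) false) i 0
              - PySem.List.pyGetD (PySem.List.sorted ids (fun x => x) false) (i - 1) 0)
            || decide (m ≤ (st.2.length : Int)))
        then (st.1 ++ [st.2], [PySem.List.pyGetD (PySem.List.sorted ids (fun x => x) false) i 0])
        else (st.1, st.2 ++ [PySem.List.pyGetD (PySem.List.sorted ids (fun x => x) false) i 0]))
    (f := fun (st : List (List Int) × List Int) _ x prev =>
        if (decide (g < x - prev) || decide (m ≤ (st.2.length : Int)))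
        then (st.1 ++ [st.2], [x]) else (st.1, st.2 ++ [x]))
    (fun _ _ => rfl)
    ((PySem.List.sorted ids (fun x => x) false).length - 1) 1
    ([], [PySem.List.pyGetD (PySem.List.sorted ids (fun x => x) false) 0 0])
    rfl le_rfl (by rw [hst]; simp)
  simp only [Nat.cast_one] at hbr
  rw [hbr]
  have hd1 : (PySem.List.sorted ids (fun x => x) false).drop 1 = t := by rw [hst]; rfl
  have hp1 : (1 : Int) - 1 = 0 := by norm_num
  rw [hd1, hp1, hget0]
  exact A_loop m g (max m 1) rfl t h0 1 [] [h0] (by simp) (by simp only [List.length_cons, List.length_nil]; omega)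

theorem B_side (ids : List Int) (m g : Int) (hle : ¬ (ids.length : Int) ≤ m)
    (h0 : Int) (t : List Int) (hst : PySem.List.sorted ids (fun x => x) false = h0 :: t) :
    adaptive_batch_ids_alt ids m g = cpart g (max m 1).toNat [h0] h0 t := by
  have hsz1 : (1 : Int) ≤ max m 1 := le_max_right _ _
  unfold adaptive_batch_ids_alt
  rw [if_neg hle]
  show (finB (PySem.List.sorted ids (fun x => x) false)
      ((PySem.List.pyRange 1 ((PySem.List.sorted ids (fun x => x) false).length : Int) 1).foldl
        _ ([], 0))).flatMap (fun run => pyChunks (max m 1) (le_max_right _ _) run) = _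
  have hget0 : PySem.List.pyGetD (PySem.List.sorted ids (fun x => x) false) 0 0 = h0 := by
    rw [hst, show (0 : Int) = ((0 : Nat) : Int) from rfl, PySem.List.pyGetD_natCast]
    rfl
  have hbr := foldl_pyRange_pairs
    (s := PySem.List.sorted ids (fun x => x) false)
    (f2 := fun (st : List (List Int) × Int) i =>
        if PySem.List.pyGetD (PySem.List.sorted ids (fun x => x) false) i 0
            - PySem.List.pyGetD (PySem.List.sorted ids (fun x => x) false) (i - 1) 0 > g
        then (st.1 ++ [PySem.List.slice (PySem.List.sorted ids (fun x => x) false) (some st.2) (some i)], i)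
        else st)
    (f := fun (st : List (List Int) × Int) i x prev =>
        if x - prev > g
        then (st.1 ++ [PySem.List.slice (PySem.List.sorted ids (fun x => x) false) (some st.2) (some i)], i)
        else st)
    (fun _ _ => rfl)
    ((PySem.List.sorted ids (fun x => x) false).length - 1) 1 ([], 0)
    rfl le_rfl (by rw [hst]; simp)
  simp only [Nat.cast_one] at hbr
  rw [hbr]
  have hd1 : (PySem.List.sorted ids (fun x => x) false).drop 1 = t := by rw [hst]; rfl
  have hp1 : (1 : Int) - 1 = 0 := by norm_num
  rw [hd1, hp1, hget0]
  have hB := B_loop g (PySem.List.sorted ids (fun x => x) false) t h0 1 0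
    [] (by omega) (by rw [hd1]) (by rw [hst]; simp)
  simp only [Nat.cast_zero, Nat.cast_one] at hB
  rw [hB]
  have hsl : PySem.List.slice (PySem.List.sorted ids (fun x => x) false) (some 0) (some 1) = [h0] := by
    rw [show (0 : Int) = ((0 : Nat) : Int) from rfl, show (1 : Int) = ((1 : Nat) : Int) from rfl,
        PySem.List.slice_natCast, hst]
    rfl
  rw [hsl]
  have hfr := flat_runs g (max m 1) hsz1 t h0 [] [h0] (by simp) (by simp) (by simp only [List.length_cons, List.length_nil]; omega)
  simp only [List.flatten_nil, List.nil_append] at hfr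
  simp only [List.nil_append]
  exact hfr

-- ===== VERDICT (by name: the statement is the Claim_ definition above) =====
theorem adaptive_batch_ids_spec : Claim_equal_adaptive_batch_ids := by
  intro ids m g _ hpre
  unfold Spec_adaptive_batch_ids
  by_cases hle : (ids.length : Int) ≤ m
  · unfold adaptive_batch_ids adaptive_batch_ids_alt
    rw [if_pos hle, if_pos hle]
  · have hne : ids ≠ [] := by
      intro hnil
      subst hnil
      simp only [List.length_nil, Nat.cast_zero] at hle
      exact hpre ⟨rfl, by omega⟩
    have hsne : PySem.List.sorted ids (fun x => x) false ≠ [] := by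
      intro hnil
      exact hne ((PySem.List.sorted_eq_nil_iff _ _ _).mp hnil)
    obtain ⟨h0, t, hst⟩ := List.exists_cons_of_ne_nil hsne
    rw [A_side ids m g hle h0 t hst, B_side ids m g hle h0 t hst]
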